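-- pv_equiv track=rewrite | github.com/mtwilliams-code/quantum-leap | src/conductor_takehome/scale.py | _line_text_and_spans
-- ===== SOURCE A (Python) =====
-- from typing import List, Tuple, Optional, Dict, Any
--
-- def _line_text_and_spans(line_words: List[dict]) -> Tuple[str, List[Tuple[int, int]]]:
--     # Join words with a single space; keep indices to map back to bbox later
--     spans: List[Tuple[int, int]] = []
--     parts: List[str] = []
--     pos = 0
--     for i, w in enumerate(line_words):
--         t = str(w.get("text", ""))
--         if i > 0:
--             parts.append(" ")
--             pos += 1
--         start = pos
--         parts.append(t)
--         pos += len(t)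
--         spans.append((start, pos))
--     return ("".join(parts), spans)
-- ===== SOURCE B (Python) =====
-- from typing import List, Tuple
--
-- def _line_text_and_spans(line_words: List[dict]) -> Tuple[str, List[Tuple[int, int]]]:
--     # Divide and conquer: solve each half independently (spans relative to its own
--     # start), then merge by shifting the right half's spans past the left text
--     # plus the single joining space.
--     texts = [str(w.get("text", "")) for w in line_words]
--     if not texts:
--         return ("", [])
--
--     def solve(ts):
--         if len(ts) == 1:
--             t = ts[0]
--             return (t, [(0, len(t))])
--         mid = len(ts) // 2
--         lt, ls = solve(ts[:mid])
--         rt, rs = solve(ts[mid:])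
--         off = len(lt) + 1
--         return (lt + " " + rt, ls + [(a + off, b + off) for a, b in rs])
--
--     return solve(texts)
-- ===== Notes on version B (the rewrite author's own statement) =====
-- stated objective: alternative
-- what changed: Replaces A's single left-to-right loop with a running position by a divide-and-conquer: each half of the word list is solved independently with spans relative to its own start, and the two results are merged by concatenating the texts with one space and shifting the right half's spans by len(left)+1.
import Mathlib
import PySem

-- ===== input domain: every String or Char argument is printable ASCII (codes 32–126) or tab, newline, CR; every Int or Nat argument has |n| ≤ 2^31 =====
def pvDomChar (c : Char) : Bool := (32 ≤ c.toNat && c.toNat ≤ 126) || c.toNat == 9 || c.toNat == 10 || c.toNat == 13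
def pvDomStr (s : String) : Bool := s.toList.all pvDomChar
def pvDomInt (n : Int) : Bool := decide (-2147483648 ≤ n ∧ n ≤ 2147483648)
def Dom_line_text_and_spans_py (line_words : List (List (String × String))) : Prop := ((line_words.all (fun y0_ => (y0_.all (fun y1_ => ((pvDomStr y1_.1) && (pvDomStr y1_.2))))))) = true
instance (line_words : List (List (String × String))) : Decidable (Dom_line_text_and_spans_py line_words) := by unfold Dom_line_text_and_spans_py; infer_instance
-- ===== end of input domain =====

-- B replaces A's single left-to-right loop (running position) by a divide-and-conquer
-- that solves each half of the word list independently and merges by shifting the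
-- right half's spans; alternative decomposition, not claimed faster.

-- ===== PORT A =====
-- state: (parts as list of char-lists, spans, pos); "".join(parts) at the end
def line_text_and_spans_py (line_words : List (List (String × String))) : String × (List (Int × Int)) :=
  let st :=
    (PySem.List.enumerate line_words 0).foldl
      (fun (st : List (List Char) × List (Int × Int) × Int) iw =>
        let parts := st.1
        let spans := st.2.1
        let pos := st.2.2
        let t := ((PySem.Dict.mk iw.2).getD "text" "").toList  -- str(w.get("text","")) : value already a str
        let parts := if iw.1 > 0 then parts ++ [[' ']] else parts
        let pos := if iw.1 > 0 then pos + 1 else pos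
        let start := pos
        (parts ++ [t], spans ++ [(start, pos + (t.length : Int))], pos + (t.length : Int)))
      ([], [], 0)
  (String.ofList st.1.flatten, st.2.1)

-- ===== PORT B =====
-- Source B's inner `solve`: divide and conquer over the list of texts
def pvSolve : List (List Char) → List Char × List (Int × Int)
  | [] => ([], [])   -- unreachable: Source B only calls solve on nonempty lists (totality guard)
  | [t] => (t, [(0, (t.length : Int))])
  | t1 :: t2 :: rest =>
    let mid := (t1 :: t2 :: rest).length / 2
    let L := pvSolve ((t1 :: t2 :: rest).take mid)
    let R := pvSolve ((t1 :: t2 :: rest).drop mid)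
    let off := (L.1.length : Int) + 1
    (L.1 ++ ' ' :: R.1, L.2 ++ R.2.map (fun p => (p.1 + off, p.2 + off)))
termination_by ts => ts.length
decreasing_by
  all_goals (simp [List.length_take, List.length_drop]; omega)

def line_text_and_spans_py_alt (line_words : List (List (String × String))) : String × (List (Int × Int)) :=
  let texts := line_words.map (fun w => ((PySem.Dict.mk w).getD "text" "").toList)
  if texts.isEmpty then ("", [])
  else
    let r := pvSolve texts
    (String.ofList r.1, r.2)

-- ===== PRECONDITION & SPEC =====
def Spec_line_text_and_spans_py (line_words : List (List (String × String))) (out : String × (List (Int × Int))) : Prop := out = line_text_and_spans_py_alt line_words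
instance (line_words : List (List (String × String))) (out : String × (List (Int × Int))) : Decidable (Spec_line_text_and_spans_py line_words out) := by unfold Spec_line_text_and_spans_py; infer_instance

-- ===== CLAIM (what is proved, stated in full; the proofs are below) =====
def Claim_equal_line_text_and_spans_py : Prop := ∀ (line_words : List (List (String × String))), Dom_line_text_and_spans_py line_words → Spec_line_text_and_spans_py line_words (line_text_and_spans_py line_words)

-- ===== LEMMAS AND PROOFS =====

-- the text of word w
def pvT (w : List (String × String)) : List Char := ((PySem.Dict.mk w).getD "text" "").toList

-- spans of consecutive texts starting at offset s (one space between words)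
def pvSegsT : List (List Char) → Int → List (Int × Int)
  | [], _ => []
  | t :: ts, s => (s, s + (t.length : Int)) :: pvSegsT ts (s + (t.length : Int) + 1)

-- total advance contributed by a list of texts (length + one space each)
def pvAdvT : List (List Char) → Int
  | [] => 0
  | t :: ts => (t.length : Int) + 1 + pvAdvT ts

-- shifting the starting offset = shifting every span
theorem pvSegsT_shift (ts : List (List Char)) : ∀ (a s : Int),
    (pvSegsT ts a).map (fun p => (p.1 + s, p.2 + s)) = pvSegsT ts (a + s) := by
  induction ts with
  | nil => intro a s; rfl
  | cons t ts ih =>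
    intro a s
    simp only [pvSegsT, List.map_cons]
    refine congrArg₂ List.cons (by simp [Prod.ext_iff]; omega) ?_
    rw [ih (a + (t.length : Int) + 1) s]
    congr 1; omega

theorem pvSegsT_append (l r : List (List Char)) : ∀ (a : Int),
    pvSegsT (l ++ r) a = pvSegsT l a ++ pvSegsT r (a + pvAdvT l) := by
  induction l with
  | nil => intro a; simp [pvSegsT, pvAdvT]
  | cons t l ih =>
    intro a
    simp only [List.cons_append, pvSegsT, pvAdvT]
    refine congrArg (List.cons _) ?_
    rw [ih]
    have hx : a + (t.length : Int) + 1 + pvAdvT l = a + ((t.length : Int) + 1 + pvAdvT l) := by ring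
    rw [hx]

-- intercalate with one space, cons case for nonempty tail
theorem pvIc_cons (t : List Char) (ts : List (List Char)) (h : ts ≠ []) :
    List.intercalate [' '] (t :: ts) = t ++ ' ' :: List.intercalate [' '] ts := by
  cases ts with
  | nil => exact absurd rfl h
  | cons u us => simp [List.intercalate, List.intersperse]

-- intercalate splits over append of nonempty halves
theorem pvIc_append (l r : List (List Char)) (hl : l ≠ []) (hr : r ≠ []) :
    List.intercalate [' '] (l ++ r) = List.intercalate [' '] l ++ ' ' :: List.intercalate [' '] r := by
  induction l with
  | nil => exact absurd rfl hl
  | cons t l ih =>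
    cases l with
    | nil =>
      cases r with
      | nil => exact absurd rfl hr
      | cons u us => simp [List.intercalate]
    | cons t2 l2 =>
      have h1 : (t2 :: l2) ++ r ≠ [] := by simp
      rw [List.cons_append, pvIc_cons t _ h1, ih (by simp), pvIc_cons t (t2 :: l2) (by simp)]
      simp

-- advance = joined length + 1, for nonempty lists
theorem pvAdvT_len (l : List (List Char)) (hl : l ≠ []) :
    pvAdvT l = ((List.intercalate [' '] l).length : Int) + 1 := by
  induction l with
  | nil => exact absurd rfl hl
  | cons t l ih =>
    cases l with
    | nil => simp [pvAdvT, List.intercalate]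
    | cons u us =>
      rw [show pvAdvT (t :: u :: us) = ((t.length : Int)) + 1 + pvAdvT (u :: us) from rfl,
        ih (by simp), pvIc_cons t (u :: us) (by simp)]
      push_cast [List.length_append, List.length_cons]; ring

-- B's divide and conquer computes join + spans-from-0
theorem pvSolve_spec : ∀ (n : ℕ) (ts : List (List Char)), ts.length = n → ts ≠ [] →
    pvSolve ts = (List.intercalate [' '] ts, pvSegsT ts 0) := by
  intro n
  induction n using Nat.strong_induction_on with
  | _ n ih =>
    intro ts hn hne
    match ts, hn with
    | [t], _ => simp [pvSolve, pvSegsT, List.intercalate]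
    | t1 :: t2 :: rest, hn =>
      rw [pvSolve]
      set ts := t1 :: t2 :: rest with hts
      have hlen : 2 ≤ ts.length := by simp [hts]
      set mid := ts.length / 2 with hmid
      have hmid1 : 1 ≤ mid := by omega
      have hmidlt : mid < ts.length := by omega
      have hl_ne : ts.take mid ≠ [] := by
        intro h; have := congrArg List.length h; simp [List.length_take] at this; omega
      have hr_ne : ts.drop mid ≠ [] := by
        intro h; have := congrArg List.length h; simp [List.length_drop] at this; omega
      have hLlen : (ts.take mid).length < n := by simp [List.length_take]; omega
      have hRlen : (ts.drop mid).length < n := by simp [List.length_drop]; omega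
      rw [ih _ hLlen (ts.take mid) rfl hl_ne, ih _ hRlen (ts.drop mid) rfl hr_ne]
      set L2 := ts.take mid with hL2
      set R2 := ts.drop mid with hR2
      have hsplit : L2 ++ R2 = ts := List.take_append_drop mid ts
      refine Prod.ext ?_ ?_
      · show List.intercalate [' '] L2 ++ ' ' :: List.intercalate [' '] R2
            = List.intercalate [' '] ts
        rw [← hsplit]; exact (pvIc_append _ _ hl_ne hr_ne).symm
      · show pvSegsT L2 0 ++
              (pvSegsT R2 0).map
                (fun p => (p.1 + (((List.intercalate [' '] L2).length : Int) + 1),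
                           p.2 + (((List.intercalate [' '] L2).length : Int) + 1)))
            = pvSegsT ts 0
        rw [pvSegsT_shift, ← pvAdvT_len _ hl_ne, ← hsplit, pvSegsT_append]

-- A's loop body, named
def pvStepA (st : List (List Char) × List (Int × Int) × Int) (iw : Int × List (String × String)) :
    List (List Char) × List (Int × Int) × Int :=
  let parts := st.1
  let spans := st.2.1
  let pos := st.2.2
  let t := ((PySem.Dict.mk iw.2).getD "text" "").toList
  let parts := if iw.1 > 0 then parts ++ [[' ']] else parts
  let pos := if iw.1 > 0 then pos + 1 else pos
  let start := pos
  (parts ++ [t], spans ++ [(start, pos + (t.length : Int))], pos + (t.length : Int))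

theorem pvPortA_eq (lw : List (List (String × String))) :
    line_text_and_spans_py lw =
      (let st := (PySem.List.enumerate lw 0).foldl pvStepA ([], [], 0)
       (String.ofList st.1.flatten, st.2.1)) := rfl

-- A's loop over the tail (all indices positive, so every word is space-prefixed)
theorem pvTailFold (ws : List (List (String × String))) : ∀ (i : Int), 0 < i →
    ∀ (parts : List (List Char)) (spans : List (Int × Int)) (pos : Int),
    (PySem.List.enumerate ws i).foldl pvStepA (parts, spans, pos) =
      (parts ++ ws.flatMap (fun w => [[' '], pvT w]),
       spans ++ pvSegsT (ws.map pvT) (pos + 1),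
       pos + pvAdvT (ws.map pvT)) := by
  induction ws with
  | nil => intro i hi parts spans pos; simp [PySem.List.enumerate_nil, pvAdvT, pvSegsT]
  | cons w ws ih =>
    intro i hi parts spans pos
    rw [PySem.List.enumerate_cons, List.foldl_cons]
    have hstep : pvStepA (parts, spans, pos) (i, w) =
        (parts ++ [[' ']] ++ [pvT w], spans ++ [(pos + 1, pos + 1 + ((pvT w).length : Int))],
         pos + 1 + ((pvT w).length : Int)) := by
      simp [pvStepA, pvT, hi]
    rw [hstep, ih (i + 1) (by omega)]
    refine Prod.ext ?_ (Prod.ext ?_ ?_)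
    · simp
    · simp only [List.map_cons, pvSegsT, List.append_assoc, List.singleton_append]
    · show pos + 1 + ((pvT w).length : Int) + pvAdvT (ws.map pvT) = pos + pvAdvT ((w :: ws).map pvT)
      simp [pvAdvT]; ring

-- intercalate with a single space = head plus flatMap of space-prefixed tails
theorem pvIntercalate (t : List Char) (ts : List (List Char)) :
    List.intercalate [' '] (t :: ts) = t ++ ts.flatMap (fun u => ' ' :: u) := by
  induction ts generalizing t with
  | nil => simp [List.intercalate]
  | cons u us ih =>
    have h := ih u
    simp [List.intercalate, List.intersperse] at h ⊢
    simpa using congrArg (fun l => t ++ ' ' :: l) h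

-- double flatten of the space/text pairs
theorem pvFlat (ws : List (List (String × String))) :
    (List.map (fun v => [[' '], pvT v]) ws).flatten.flatten =
      (List.map (fun v => ' ' :: pvT v) ws).flatten := by
  induction ws with
  | nil => rfl
  | cons w ws ih => simp [ih]

-- ===== VERDICT (by name: the statement is the Claim_ definition above) =====
theorem line_text_and_spans_py_spec : Claim_equal_line_text_and_spans_py := by
  intro line_words _
  show line_text_and_spans_py line_words = line_text_and_spans_py_alt line_words
  cases line_words with
  | nil => rfl
  | cons w ws =>
    rw [pvPortA_eq]
    rw [PySem.List.enumerate_cons, List.foldl_cons]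
    have h0 : pvStepA (([] : List (List Char)), ([] : List (Int × Int)), (0 : Int)) (0, w) =
        ([pvT w], [((0 : Int), ((pvT w).length : Int))], ((pvT w).length : Int)) := by
      simp [pvStepA, pvT]
    rw [h0]
    simp only [show (0:Int) + 1 = 1 from rfl]
    rw [pvTailFold ws 1 (by omega)]
    have htexts : (w :: ws).map (fun v => ((PySem.Dict.mk v).getD "text" "").toList)
        = (w :: ws).map pvT := rfl
    simp only [line_text_and_spans_py_alt, htexts, List.map_cons, List.isEmpty_cons,
      if_neg (by simp : ¬ (false = true))]
    rw [pvSolve_spec (pvT w :: ws.map pvT).length (pvT w :: ws.map pvT) rfl (by simp)]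
    refine Prod.ext ?_ ?_
    · refine congrArg String.ofList ?_
      rw [pvIntercalate]
      simp only [List.flatMap_def, List.flatten_append, pvFlat]
      simp [List.map_map, Function.comp_def]
    · show ([((0 : Int), ((pvT w).length : Int))] ++ pvSegsT (ws.map pvT) (((pvT w).length : Int) + 1))
          = pvSegsT ((w :: ws).map pvT) 0
      simp [pvSegsT]
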